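-- pv_equiv track=rewrite | github.com/pr1m8/haive-agents | src/haive/agents/task_analysis/tree/models.py | _has_path_between
-- ===== SOURCE A (Python) =====
-- def _has_path_between(
--     id1: str, id2: str, dep_map: dict[str, list[str]]
-- ) -> bool:
--     """Check if there's a dependency path between two tasks."""
--     # BFS to find path
--     visited = set()
--     queue = [id1]
--
--     while queue:
--         current = queue.pop(0)
--         if current == id2:
--             return True
--
--         visited.add(current)
--
--         # Check dependencies
--         if current in dep_map:
--             for dep in dep_map[current]:
--                 if dep not in visited:
--                     queue.append(dep)
--
--     return False
-- ===== SOURCE B (Python) =====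
-- def _has_path_between(
--     id1: str, id2: str, dep_map: dict[str, list[str]]
-- ) -> bool:
--     """Check if there's a dependency path between two tasks."""
--     # Fixed-point saturation: grow the reachable set by whole passes over the
--     # edge map until nothing new appears, then just test membership.
--     reach = {id1}
--     while True:
--         new = {v for u, deps in dep_map.items() if u in reach
--                  for v in deps if v not in reach}
--         if not new:
--             return id2 in reach
--         reach |= new
-- ===== Notes on version B (the rewrite author's own statement) =====
-- stated objective: alternative
-- what changed: A does a queue-based BFS (pop from the front of a list, mark visited on dequeue); B has no queue or visited set at all: it computes the reachable set as a fixed point, repeating whole passes over the edge map that add every newly reachable node until a pass adds nothing, then tests membership of id2. Pre_ excludes association lists with duplicate keys, which cannot arise from a Python dict argument.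
import Mathlib
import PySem

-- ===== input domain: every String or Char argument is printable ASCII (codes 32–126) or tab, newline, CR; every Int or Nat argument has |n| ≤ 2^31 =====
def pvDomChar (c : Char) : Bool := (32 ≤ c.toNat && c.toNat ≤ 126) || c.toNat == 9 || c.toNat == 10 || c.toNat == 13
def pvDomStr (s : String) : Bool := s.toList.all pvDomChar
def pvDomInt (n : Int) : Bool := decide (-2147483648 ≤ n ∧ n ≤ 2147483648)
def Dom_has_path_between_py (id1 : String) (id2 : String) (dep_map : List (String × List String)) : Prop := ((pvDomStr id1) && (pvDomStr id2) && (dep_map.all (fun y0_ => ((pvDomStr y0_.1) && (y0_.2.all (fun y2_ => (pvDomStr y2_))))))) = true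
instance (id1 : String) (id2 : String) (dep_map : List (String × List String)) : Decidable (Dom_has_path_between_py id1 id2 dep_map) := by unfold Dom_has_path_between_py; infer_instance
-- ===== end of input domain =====

-- B replaces A's queue-based BFS by a fixed-point saturation: whole passes over the
-- edge map grow the reachable set until nothing new appears; then id2 is tested.

-- ===== PORT A =====
-- first-match association-list lookup: `dep_map[current] if current in dep_map else []`
def pvAdj (dep_map : List (String × List String)) (u : String) : List String :=
  match dep_map.find? (fun p => p.1 == u) with
  | some p => p.2
  | none => []

-- all strings occurring as dependency values (used only to justify termination of the loops)
def pvUniv (dep_map : List (String × List String)) : List String :=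
  dep_map.flatMap Prod.snd

lemma pvAdj_subset_univ (dep_map : List (String × List String)) (u v : String)
    (hv : v ∈ pvAdj dep_map u) : v ∈ pvUniv dep_map := by
  unfold pvAdj at hv
  cases hfind : dep_map.find? (fun p => p.1 == u) with
  | none => rw [hfind] at hv; simp at hv
  | some p =>
    rw [hfind] at hv
    exact List.mem_flatMap.mpr ⟨p, List.mem_of_find?_eq_some hfind, hv⟩

-- a shrinking lemma for the termination measures of both loops
lemma pv_filter_lt {α : Type} (l : List α) (p p' : α → Bool)
    (hmono : ∀ x, p' x = true → p x = true) {c : α} (hc : c ∈ l)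
    (hpc : p c = true) (hpc' : p' c = false) :
    (l.filter p').length < (l.filter p).length := by
  induction l with
  | nil => cases hc
  | cons a l ih =>
    rcases List.mem_cons.mp hc with rfl | ha
    · have hle : (l.filter p').length ≤ (l.filter p).length :=
        List.Sublist.length_le (List.monotone_filter_right l (fun x hx => hmono x hx))
      simp [hpc, hpc']
      omega
    · have h' := ih ha
      by_cases hpa : p a = true
      · by_cases hpa' : p' a = true
        · simp [hpa, hpa']
          omega
        · simp only [Bool.not_eq_true] at hpa'
          simp [hpa, hpa']
          omega
      · have hpa' : p' a = false := by
          cases h'' : p' a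
          · rfl
          · exact absurd (hmono a h'') hpa
        simp only [Bool.not_eq_true] at hpa
        simp [hpa, hpa']
        omega

-- A's while loop: pop from the front, test for id2, mark visited on dequeue, append unvisited deps.
-- The `univ`/hypothesis arguments exist only to justify termination; they do not affect the value.
def aLoop (id2 : String) (dep_map : List (String × List String)) (univ : List String)
    (visited : PySem.Set String) (queue : List String)
    (hq : ∀ x ∈ queue, x ∈ univ)
    (hd : ∀ u v, v ∈ pvAdj dep_map u → v ∈ univ) : Bool :=
  match queue with
  | [] => false
  | current :: rest =>
    if current = id2 then true
    else
      let visited' := PySem.Set.add visited current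
      aLoop id2 dep_map univ visited'
        (rest ++ (pvAdj dep_map current).filter (fun dep => !(visited'.contains dep)))
        (by
          intro x hx
          rcases List.mem_append.mp hx with h | h
          · exact hq x (List.mem_cons_of_mem _ h)
          · exact hd current x (List.mem_of_mem_filter h))
        hd
termination_by ((univ.filter (fun x => !(visited.contains x))).length,
                (queue.filter (fun x => visited.contains x)).length)
decreasing_by
  by_cases hc : visited.contains current = true
  · have hv : PySem.Set.add visited current = visited :=
      PySem.Set.add_of_mem ((PySem.Set.contains_iff visited current).mp hc)
    apply Prod.Lex.right'
    · simp only [hv]; exact Nat.le_refl _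
    · simp only [hv, List.filter_append, List.filter_cons, hc, if_pos,
        List.length_append, List.length_cons]
      have : ((pvAdj dep_map current).filter (fun dep => !(visited.contains dep))).filter
          (fun x => visited.contains x) = [] := by
        rw [List.filter_filter]
        apply List.filter_eq_nil_iff.mpr
        intro a _
        simp
      rw [this]
      simp
  · apply Prod.Lex.left
    refine pv_filter_lt univ _ _ ?_ (hq current List.mem_cons_self) ?_ ?_
    · intro x hx
      cases h : visited.contains x
      · rfl
      · exfalso
        have hmem : x ∈ PySem.Set.add visited current :=
          (PySem.Set.mem_add _ _ _).mpr (Or.inl ((PySem.Set.contains_iff _ _).mp h))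
        rw [← PySem.Set.contains_iff] at hmem
        change (!(PySem.Set.add visited current).contains x) = true at hx
        rw [hmem] at hx
        cases hx
    · rw [Bool.eq_false_iff.mpr hc]; rfl
    · have hmem : current ∈ PySem.Set.add visited current :=
        (PySem.Set.mem_add _ _ _).mpr (Or.inr rfl)
      rw [← PySem.Set.contains_iff] at hmem
      change (!(PySem.Set.add visited current).contains current) = false
      rw [hmem]; rfl

def has_path_between_py (id1 : String) (id2 : String) (dep_map : List (String × List String)) : Bool :=
  aLoop id2 dep_map (id1 :: pvUniv dep_map) PySem.Set.empty [id1]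
    (by intro x hx; simp only [List.mem_singleton] at hx; exact hx ▸ List.mem_cons_self)
    (by intro u v hv; exact List.mem_cons_of_mem _ (pvAdj_subset_univ dep_map u v hv))

-- ===== PORT B =====
-- the set comprehension of Source B: {v for u, deps in dep_map.items() if u in reach
--                                   for v in deps if v not in reach}
def pvNewNodes (dep_map : List (String × List String)) (reach : PySem.Set String) : PySem.Set String :=
  dep_map.foldl (fun acc p =>
    if reach.contains p.1 then
      p.2.foldl (fun acc2 v => if reach.contains v then acc2 else PySem.Set.add acc2 v) acc
    else acc) PySem.Set.empty

lemma mem_pvNewNodes_inner (reach : PySem.Set String) (deps : List String)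
    (acc : PySem.Set String) (x : String) :
    x ∈ deps.foldl (fun acc2 v => if reach.contains v then acc2 else PySem.Set.add acc2 v) acc ↔
      x ∈ acc ∨ (x ∈ deps ∧ x ∉ reach) := by
  induction deps generalizing acc with
  | nil => simp
  | cons v rest ih =>
    simp only [List.foldl_cons]
    by_cases hv : reach.contains v = true
    · rw [if_pos hv, ih]
      constructor
      · rintro (h | ⟨h1, h2⟩)
        · exact Or.inl h
        · exact Or.inr ⟨List.mem_cons_of_mem _ h1, h2⟩
      · rintro (h | ⟨h1, h2⟩)
        · exact Or.inl h
        · rcases List.mem_cons.mp h1 with rfl | h1'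
          · exact absurd ((PySem.Set.contains_iff _ _).mp hv) h2
          · exact Or.inr ⟨h1', h2⟩
    · rw [if_neg hv, ih]
      have hvr : v ∉ reach := fun hm => hv ((PySem.Set.contains_iff _ _).mpr hm)
      constructor
      · rintro (h | ⟨h1, h2⟩)
        · rcases (PySem.Set.mem_add _ _ _).mp h with h' | rfl
          · exact Or.inl h'
          · exact Or.inr ⟨List.mem_cons_self, hvr⟩
        · exact Or.inr ⟨List.mem_cons_of_mem _ h1, h2⟩
      · rintro (h | ⟨h1, h2⟩)
        · exact Or.inl ((PySem.Set.mem_add _ _ _).mpr (Or.inl h))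
        · rcases List.mem_cons.mp h1 with rfl | h1'
          · exact Or.inl ((PySem.Set.mem_add _ _ _).mpr (Or.inr rfl))
          · exact Or.inr ⟨h1', h2⟩

lemma mem_pvNewNodes_aux (dep_map : List (String × List String)) (reach : PySem.Set String)
    (acc : PySem.Set String) (x : String) :
    x ∈ dep_map.foldl (fun acc p =>
        if reach.contains p.1 then
          p.2.foldl (fun acc2 v => if reach.contains v then acc2 else PySem.Set.add acc2 v) acc
        else acc) acc ↔
      x ∈ acc ∨ ((∃ p ∈ dep_map, reach.contains p.1 = true ∧ x ∈ p.2) ∧ x ∉ reach) := by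
  induction dep_map generalizing acc with
  | nil => simp
  | cons p rest ih =>
    simp only [List.foldl_cons]
    by_cases hp : reach.contains p.1 = true
    · rw [if_pos hp, ih]
      rw [mem_pvNewNodes_inner]
      constructor
      · rintro ((h | ⟨h1, h2⟩) | ⟨⟨q, hq, hq1, hq2⟩, h2⟩)
        · exact Or.inl h
        · exact Or.inr ⟨⟨p, List.mem_cons_self, hp, h1⟩, h2⟩
        · exact Or.inr ⟨⟨q, List.mem_cons_of_mem _ hq, hq1, hq2⟩, h2⟩
      · rintro (h | ⟨⟨q, hq, hq1, hq2⟩, h2⟩)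
        · exact Or.inl (Or.inl h)
        · rcases List.mem_cons.mp hq with rfl | hq'
          · exact Or.inl (Or.inr ⟨hq2, h2⟩)
          · exact Or.inr ⟨⟨q, hq', hq1, hq2⟩, h2⟩
    · rw [if_neg hp, ih]
      constructor
      · rintro (h | ⟨⟨q, hq, hq1, hq2⟩, h2⟩)
        · exact Or.inl h
        · exact Or.inr ⟨⟨q, List.mem_cons_of_mem _ hq, hq1, hq2⟩, h2⟩
      · rintro (h | ⟨⟨q, hq, hq1, hq2⟩, h2⟩)
        · exact Or.inl h
        · rcases List.mem_cons.mp hq with rfl | hq'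
          · exact absurd hq1 hp
          · exact Or.inr ⟨⟨q, hq', hq1, hq2⟩, h2⟩

lemma mem_pvNewNodes (dep_map : List (String × List String)) (reach : PySem.Set String)
    (x : String) :
    x ∈ pvNewNodes dep_map reach ↔
      (∃ p ∈ dep_map, reach.contains p.1 = true ∧ x ∈ p.2) ∧ x ∉ reach := by
  unfold pvNewNodes
  rw [mem_pvNewNodes_aux]
  simp [PySem.Set.empty]

-- B's while loop: one saturation pass; stop (and test id2) when the pass adds nothing.
def satLoop (id2 : String) (dep_map : List (String × List String))
    (reach : PySem.Set String) : Bool :=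
  let new := pvNewNodes dep_map reach
  if new.isEmpty then reach.contains id2
  else satLoop id2 dep_map (PySem.Set.union reach new)
termination_by (((pvUniv dep_map).filter (fun x => !(reach.contains x))).length)
decreasing_by
  rename_i hne
  have hnil : pvNewNodes dep_map reach ≠ [] := by
    intro h; exact hne (by simp [new, h, List.isEmpty])
  obtain ⟨c, tl, hc⟩ := List.exists_cons_of_ne_nil hnil
  have hcmem : c ∈ pvNewNodes dep_map reach := by rw [hc]; exact List.mem_cons_self
  obtain ⟨⟨p, hp, hp1, hp2⟩, hcr⟩ := (mem_pvNewNodes dep_map reach c).mp hcmem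
  have hcuniv : c ∈ pvUniv dep_map := List.mem_flatMap.mpr ⟨p, hp, hp2⟩
  refine pv_filter_lt _ _ _ ?_ hcuniv ?_ ?_
  · intro x hx
    simp only [Bool.not_eq_true'] at hx ⊢
    cases hr : reach.contains x
    · rfl
    · exfalso
      have : x ∈ PySem.Set.union reach new :=
        (PySem.Set.mem_union _ _ _).mpr (Or.inl ((PySem.Set.contains_iff _ _).mp hr))
      rw [(PySem.Set.contains_iff _ _).mpr this] at hx
      cases hx
  · simp only [Bool.not_eq_true']
    cases hr : reach.contains c
    · rfl
    · exact absurd ((PySem.Set.contains_iff _ _).mp hr) hcr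
  · have : c ∈ PySem.Set.union reach new :=
      (PySem.Set.mem_union _ _ _).mpr (Or.inr hcmem)
    simp only [Bool.not_eq_false']
    exact (PySem.Set.contains_iff _ _).mpr this

def has_path_between_py_alt (id1 : String) (id2 : String) (dep_map : List (String × List String)) : Bool :=
  satLoop id2 dep_map (PySem.Set.ofList [id1])

-- ===== PRECONDITION & SPEC =====
-- Pre_ excludes association lists whose keys repeat: a Python dict argument always has
-- distinct keys, and on duplicate keys the two ports read the map differently (A uses
-- the first match only, B's pass reads every entry); no Python input is excluded.
def Pre_has_path_between_py (id1 : String) (id2 : String) (dep_map : List (String × List String)) : Prop :=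
  (dep_map.map Prod.fst).Nodup
instance (id1 : String) (id2 : String) (dep_map : List (String × List String)) : Decidable (Pre_has_path_between_py id1 id2 dep_map) := by unfold Pre_has_path_between_py; infer_instance

def pvWitness_has_path_between_py : String × String × (List (String × List String)) :=
  ("a", "c", [("a", ["b"]), ("b", ["c"])])

def Spec_has_path_between_py (id1 : String) (id2 : String) (dep_map : List (String × List String)) (out : Bool) : Prop := out = has_path_between_py_alt id1 id2 dep_map
instance (id1 : String) (id2 : String) (dep_map : List (String × List String)) (out : Bool) : Decidable (Spec_has_path_between_py id1 id2 dep_map out) := by unfold Spec_has_path_between_py; infer_instance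

-- ===== CLAIM (what is proved, stated in full; the proofs are below) =====
def Claim_equal_has_path_between_py : Prop := ∀ (id1 : String) (id2 : String) (dep_map : List (String × List String)), Dom_has_path_between_py id1 id2 dep_map → Pre_has_path_between_py id1 id2 dep_map → Spec_has_path_between_py id1 id2 dep_map (has_path_between_py id1 id2 dep_map)

-- ===== LEMMAS AND PROOFS =====

-- dependency-reachability: both programs return `true` exactly on `pvReach dep_map id1 id2`
inductive pvReach (dep_map : List (String × List String)) (root : String) : String → Prop
  | refl : pvReach dep_map root root
  | step {u v : String} : pvReach dep_map root u → v ∈ pvAdj dep_map u → pvReach dep_map root v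

lemma pvReach_closed (dep_map : List (String × List String)) (root : String)
    (S : String → Prop) (hroot : S root) (hclosed : ∀ u, S u → ∀ v ∈ pvAdj dep_map u, S v) :
    ∀ x, pvReach dep_map root x → S x := by
  intro x hx
  induction hx with
  | refl => exact hroot
  | step _ hv ih => exact hclosed _ ih _ hv

lemma pvAdj_mem (dep_map : List (String × List String)) (u v : String)
    (hv : v ∈ pvAdj dep_map u) : ∃ p ∈ dep_map, p.1 = u ∧ v ∈ p.2 := by
  unfold pvAdj at hv
  cases hfind : dep_map.find? (fun p => p.1 == u) with
  | none => rw [hfind] at hv; simp at hv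
  | some p =>
    rw [hfind] at hv
    exact ⟨p, List.mem_of_find?_eq_some hfind,
      by simpa using List.find?_some hfind, hv⟩

-- with distinct keys, every stored pair IS the first match of its key
lemma pvAdj_of_mem (dep_map : List (String × List String))
    (hnd : (dep_map.map Prod.fst).Nodup) {p : String × List String} (hp : p ∈ dep_map) :
    pvAdj dep_map p.1 = p.2 := by
  unfold pvAdj
  cases hfind : dep_map.find? (fun q => q.1 == p.1) with
  | none =>
    exfalso
    have := List.find?_eq_none.mp hfind p hp
    simp at this
  | some q =>
    have hq : q ∈ dep_map := List.mem_of_find?_eq_some hfind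
    have hq1 : q.1 = p.1 := by simpa using List.find?_some hfind
    have := List.inj_on_of_nodup_map hnd hq hp hq1
    rw [this]

lemma satLoop_true (id2 root : String) (dep_map : List (String × List String))
    (hnd : (dep_map.map Prod.fst).Nodup)
    (reach : PySem.Set String)
    (hsound : ∀ x ∈ reach, pvReach dep_map root x)
    (h : satLoop id2 dep_map reach = true) : pvReach dep_map root id2 := by
  fun_induction satLoop id2 dep_map reach with
  | case1 =>
    rename_i reach new hemp
    exact hsound id2 ((PySem.Set.contains_iff _ _).mp h)
  | case2 =>
    rename_i reach new hemp ih
    apply ih ?_ h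
    intro x hx
    rcases (PySem.Set.mem_union _ _ _).mp hx with hx' | hx'
    · exact hsound x hx'
    · obtain ⟨⟨p, hp, hp1, hp2⟩, _⟩ := (mem_pvNewNodes dep_map reach x).mp hx'
      refine pvReach.step (hsound p.1 ((PySem.Set.contains_iff _ _).mp hp1)) ?_
      rw [pvAdj_of_mem dep_map hnd hp]
      exact hp2
  
lemma satLoop_false (id2 root : String) (dep_map : List (String × List String))
    (reach : PySem.Set String)
    (hroot : root ∈ reach)
    (h : satLoop id2 dep_map reach = false) : ¬ pvReach dep_map root id2 := by
  fun_induction satLoop id2 dep_map reach with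
  | case1 =>
    rename_i reach new hemp
    intro hre
    have hid2 : id2 ∉ reach := by
      intro hm
      rw [(PySem.Set.contains_iff _ _).mpr hm] at h
      cases h
    have hnil : pvNewNodes dep_map reach = [] := by
      cases hv : pvNewNodes dep_map reach with
      | nil => rfl
      | cons a tl =>
        exfalso
        have : new.isEmpty = true := hemp
        rw [show new = pvNewNodes dep_map reach from rfl, hv] at this
        simp [List.isEmpty] at this
    have hclosed : ∀ u, u ∈ reach → ∀ v ∈ pvAdj dep_map u, v ∈ reach := by
      intro u hu v hv
      by_contra hvr
      obtain ⟨p, hp, hp1, hp2⟩ := pvAdj_mem dep_map u v hv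
      have : v ∈ pvNewNodes dep_map reach :=
        (mem_pvNewNodes dep_map reach v).mpr
          ⟨⟨p, hp, by rw [hp1]; exact (PySem.Set.contains_iff _ _).mpr hu, hp2⟩, hvr⟩
      rw [hnil] at this
      exact List.not_mem_nil this
    exact hid2 (pvReach_closed dep_map root (· ∈ reach) hroot hclosed id2 hre)
  | case2 =>
    rename_i reach new hemp ih
    exact ih ((PySem.Set.mem_union _ _ _).mpr (Or.inl hroot)) h

lemma B_iff (id1 id2 : String) (dep_map : List (String × List String))
    (hnd : (dep_map.map Prod.fst).Nodup) :
    has_path_between_py_alt id1 id2 dep_map = true ↔ pvReach dep_map id1 id2 := by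
  unfold has_path_between_py_alt
  constructor
  · intro h
    refine satLoop_true id2 id1 dep_map hnd _ ?_ h
    intro x hx
    have : x = id1 := by
      rcases (PySem.Set.mem_ofList _ _).mp hx with h'
      simpa using h'
    exact this ▸ pvReach.refl
  · intro hre
    cases hB : satLoop id2 dep_map (PySem.Set.ofList [id1]) with
    | true => rfl
    | false =>
      exact absurd hre (satLoop_false id2 id1 dep_map _
        ((PySem.Set.mem_ofList _ _).mpr (List.mem_singleton.mpr rfl)) hB)

lemma aLoop_true (id2 root : String) (dep_map : List (String × List String)) (univ : List String)
    (visited : PySem.Set String) (queue : List String) (hq) (hd)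
    (hr : ∀ x ∈ queue, pvReach dep_map root x)
    (h : aLoop id2 dep_map univ visited queue hq hd = true) : pvReach dep_map root id2 := by
  fun_induction aLoop id2 dep_map univ visited queue hq hd with
  | case1 => simp at h
  | case2 => exact hr id2 List.mem_cons_self
  | case3 =>
    rename_i v current rest hq1 hcur visited' hq2 ih
    apply ih ?_ h
    intro x hx
    rcases List.mem_append.mp hx with hx | hx
    · exact hr x (List.mem_cons_of_mem _ hx)
    · exact pvReach.step (hr current List.mem_cons_self) (List.mem_of_mem_filter hx)

lemma aLoop_false (id2 : String) (dep_map : List (String × List String)) (univ : List String)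
    (visited : PySem.Set String) (queue : List String) (hq) (hd)
    (hinv : ∀ u ∈ visited, ∀ v ∈ pvAdj dep_map u, v ∈ visited ∨ v ∈ queue)
    (hne : id2 ∉ visited)
    (h : aLoop id2 dep_map univ visited queue hq hd = false) :
    ∃ S : String → Prop, (∀ x ∈ visited, S x) ∧ (∀ x ∈ queue, S x) ∧ ¬ S id2 ∧
      (∀ u, S u → ∀ v ∈ pvAdj dep_map u, S v) := by
  fun_induction aLoop id2 dep_map univ visited queue hq hd with
  | case1 =>
    rename_i vis hq1 hq2
    refine ⟨(· ∈ vis), fun x hx => hx, fun x hx => absurd hx List.not_mem_nil, hne, ?_⟩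
    intro u hu v hv
    rcases hinv u hu v hv with h' | h'
    · exact h'
    · exact absurd h' List.not_mem_nil
  | case2 => simp at h
  | case3 =>
    rename_i vis current rest hq1 hcur visited' hq2 ih
    have hinv' : ∀ u ∈ visited', ∀ w ∈ pvAdj dep_map u,
        w ∈ visited' ∨ w ∈ rest ++ (pvAdj dep_map current).filter (fun dep => !(visited'.contains dep)) := by
      intro u hu w hw
      rcases (PySem.Set.mem_add _ _ _).mp hu with hu' | rfl
      · rcases hinv u hu' w hw with h' | h'
        · exact Or.inl ((PySem.Set.mem_add _ _ _).mpr (Or.inl h'))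
        · rcases List.mem_cons.mp h' with rfl | h''
          · exact Or.inl ((PySem.Set.mem_add _ _ _).mpr (Or.inr rfl))
          · exact Or.inr (List.mem_append.mpr (Or.inl h''))
      · by_cases hwv : w ∈ visited'
        · exact Or.inl hwv
        · refine Or.inr (List.mem_append.mpr (Or.inr ?_))
          refine List.mem_filter.mpr ⟨hw, ?_⟩
          change (!((vis.add u).contains w)) = true
          rw [Bool.eq_false_iff.mpr (fun hc => hwv ((PySem.Set.contains_iff _ _).mp hc))]; rfl
    have hne' : id2 ∉ visited' := by
      intro hmem
      rcases (PySem.Set.mem_add _ _ _).mp hmem with h' | h'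
      · exact hne h'
      · exact hcur h'.symm
    obtain ⟨S, hSv, hSq, hSn, hSc⟩ := ih hinv' hne' h
    refine ⟨S, ?_, ?_, hSn, hSc⟩
    · intro x hx
      exact hSv x ((PySem.Set.mem_add _ _ _).mpr (Or.inl hx))
    · intro x hx
      rcases List.mem_cons.mp hx with rfl | hx'
      · exact hSv x ((PySem.Set.mem_add _ _ _).mpr (Or.inr rfl))
      · exact hSq x (List.mem_append.mpr (Or.inl hx'))

lemma A_iff (id1 id2 : String) (dep_map : List (String × List String)) :
    has_path_between_py id1 id2 dep_map = true ↔ pvReach dep_map id1 id2 := by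
  constructor
  · intro h
    unfold has_path_between_py at h
    refine aLoop_true id2 id1 dep_map _ _ _ _ _ ?_ h
    intro x hx
    rw [List.mem_singleton.mp hx]
    exact pvReach.refl
  · intro hre
    cases hA : has_path_between_py id1 id2 dep_map with
    | true => rfl
    | false =>
      exfalso
      unfold has_path_between_py at hA
      obtain ⟨S, hSv, hSq, hSn, hSc⟩ := aLoop_false id2 dep_map _ _ _ _ _
        (fun u hu => absurd hu List.not_mem_nil) (fun hm => List.not_mem_nil hm) hA
      exact hSn (pvReach_closed dep_map id1 S (hSq id1 (List.mem_singleton.mpr rfl)) hSc id2 hre)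

-- ===== VERDICT (by name: the statement is the Claim_ definition above) =====
theorem has_path_between_py_spec : Claim_equal_has_path_between_py := by
  intro id1 id2 dep_map _ hpre
  unfold Spec_has_path_between_py
  have h := (A_iff id1 id2 dep_map).trans (B_iff id1 id2 dep_map hpre).symm
  exact Bool.eq_iff_iff.mpr h
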